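-- pv_equiv track=rewrite | github.com/qrila/khvidcontrol | python/atempython/gen_proto.py | fix_ptrarg
-- ===== SOURCE A (Python) =====
-- def fix_ptrarg(args):
--     rarr = []
--     for v in args:
--         if len(rarr) >= 1 and rarr[len(rarr) - 1] == "*":
--             rarr.pop(len(rarr) - 1)
--             v = "*" + v
--
--         rarr.append(v)
--     return rarr
-- ===== SOURCE B (Python) =====
-- def fix_ptrarg(args):
--     out = []
--     pending = False
--     for v in args:
--         if pending:
--             v = "*" + v
--         pending = (v == "*")
--         if not pending:
--             out.append(v)
--     if pending:
--         out.append("*")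
--     return out
-- ===== Notes on version B (the rewrite author's own statement) =====
-- stated objective: simpler
-- what changed: Replaced the peek-and-pop mutation of the output list by a forward state machine with a boolean pending-star flag that never inspects or mutates already-emitted elements.
import Mathlib
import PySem

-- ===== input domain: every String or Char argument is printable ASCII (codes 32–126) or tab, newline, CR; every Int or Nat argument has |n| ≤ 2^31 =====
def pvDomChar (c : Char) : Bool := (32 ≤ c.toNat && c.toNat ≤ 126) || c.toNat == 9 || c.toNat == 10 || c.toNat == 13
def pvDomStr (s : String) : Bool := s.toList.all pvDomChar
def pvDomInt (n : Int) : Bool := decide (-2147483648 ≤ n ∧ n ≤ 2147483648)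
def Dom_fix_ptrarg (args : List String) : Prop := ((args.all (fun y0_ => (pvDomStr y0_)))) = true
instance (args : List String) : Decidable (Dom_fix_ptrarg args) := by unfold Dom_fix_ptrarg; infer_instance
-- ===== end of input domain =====

-- B replaces A's peek-and-pop mutation of the output list by a forward pending-star
-- state machine that never inspects already-emitted elements (objective: simpler).

-- ===== PORT A =====
-- one iteration of A's loop body: peek at rarr[len-1], pop and merge if it is "*"
def fixA_step (rarr : List String) (v : String) : List String :=
  if 1 ≤ rarr.length ∧ PySem.List.pyGet? rarr ((rarr.length : Int) - 1) = some "*" then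
    rarr.dropLast ++ ["*" ++ v]          -- rarr.pop(len(rarr)-1); v = "*" + v; rarr.append(v)
  else
    rarr ++ [v]                          -- rarr.append(v)

def fix_ptrarg (args : List String) : List String :=
  args.foldl fixA_step []

-- ===== PORT B =====
-- forward state machine: `pending` holds back a lone "*" until the next token
def fixB_go : List String → Bool → List String
  | [], pending => if pending then ["*"] else []
  | v :: rest, pending =>
      let w := if pending then "*" ++ v else v
      if w = "*" then fixB_go rest true
      else w :: fixB_go rest false

def fix_ptrarg_alt (args : List String) : List String :=
  fixB_go args false

-- ===== PRECONDITION & SPEC =====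
def Spec_fix_ptrarg (args : List String) (out : List String) : Prop := out = fix_ptrarg_alt args
instance (args : List String) (out : List String) : Decidable (Spec_fix_ptrarg args out) := by unfold Spec_fix_ptrarg; infer_instance

-- ===== CLAIM (what is proved, stated in full; the proofs are below) =====
def Claim_equal_fix_ptrarg : Prop := ∀ (args : List String), Dom_fix_ptrarg args → Spec_fix_ptrarg args (fix_ptrarg args)

-- ===== LEMMAS AND PROOFS =====

-- A's guard seen through the invariant shape: acc ++ (pending star or nothing)
theorem fixA_step_no_star (out : List String) (h : out.getLast? ≠ some "*") (v : String) :
    fixA_step out v = out ++ [v] := by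
  unfold fixA_step
  rw [if_neg]
  rintro ⟨h1, h2⟩
  cases out with
  | nil => simp at h1
  | cons a l =>
    have : ((a :: l).length : Int) - 1 = ((a :: l).length - 1 : Nat) := by
      omega
    rw [this, PySem.List.pyGet?_natCast] at h2
    have hlt : (a :: l).length - 1 < (a :: l).length := by simp
    rw [List.getElem?_eq_getElem hlt] at h2
    apply h
    rw [List.getLast?_eq_getElem?, List.getElem?_eq_getElem hlt]
    exact h2

theorem fixA_step_star (out : List String) (v : String) :
    fixA_step (out ++ ["*"]) v = out ++ ["*" ++ v] := by
  unfold fixA_step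
  rw [if_pos]
  · simp
  · constructor
    · simp
    · have : ((out ++ ["*"]).length : Int) - 1 = (out.length : Nat) := by
        simp
      rw [this, PySem.List.pyGet?_natCast]
      simp

-- the loop invariant: A's list is B's emitted output plus a held-back "*"
theorem invariant (l : List String) :
    ∀ (out : List String) (pending : Bool), out.getLast? ≠ some "*" →
      List.foldl fixA_step (out ++ if pending then ["*"] else []) l
        = out ++ fixB_go l pending := by
  induction l with
  | nil => intro out pending _; cases pending <;> simp [fixB_go]
  | cons v rest ih =>
    intro out pending h
    cases pending with
    | false =>
      simp only [if_neg Bool.false_ne_true, List.append_nil, List.foldl_cons, fixB_go]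
      by_cases hv : v = "*"
      · subst hv
        rw [fixA_step_no_star out h, if_pos rfl]
        have := ih out true h
        simpa using this
      · rw [fixA_step_no_star out h, if_neg hv]
        have hlast : (out ++ [v]).getLast? ≠ some "*" := by
          simp [List.getLast?_append]; exact hv
        have := ih (out ++ [v]) false hlast
        simpa using this
    | true =>
      simp only [List.foldl_cons, fixB_go, reduceIte]
      rw [fixA_step_star out v]
      by_cases hw : "*" ++ v = "*"
      · rw [hw, if_pos rfl]
        have := ih out true h
        simpa using this
      · rw [if_neg hw]
        have hlast : (out ++ ["*" ++ v]).getLast? ≠ some "*" := by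
          simp [List.getLast?_append]; simpa using hw
        have := ih (out ++ ["*" ++ v]) false hlast
        simpa using this

-- ===== VERDICT (by name: the statement is the Claim_ definition above) =====
theorem fix_ptrarg_spec : Claim_equal_fix_ptrarg := by
  intro args _
  unfold Spec_fix_ptrarg fix_ptrarg fix_ptrarg_alt
  have := invariant args [] false (by simp)
  simpa using this
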